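-- pv_equiv track=rewrite | github.com/ramyasingh3/DSA3 | hill_numbers.py | is_hill_number
-- ===== SOURCE A (Python) =====
-- def is_hill_number(num: int) -> bool:
--     digits = list(str(num))
--     n = len(digits)
--
--     if n < 3:
--         return False
--
--     i = 1
--     # strictly increasing
--     while i < n and digits[i] > digits[i - 1]:
--         i += 1
--
--     if i == 1 or i == n:
--         return False
--
--     # strictly decreasing
--     while i < n and digits[i] < digits[i - 1]:
--         i += 1
--
--     return i == n
-- ===== SOURCE B (Python) =====
-- def is_hill_number(num: int) -> bool:
--     s = str(num)
--     if len(s) < 3: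
--         return False
--     signs = [1 if b > a else (-1 if b < a else 0) for a, b in zip(s, s[1:])]
--     return 0 not in signs and 1 in signs and -1 in signs and signs == sorted(signs, reverse=True)
-- ===== Notes on version B (the rewrite author's own statement) =====
-- stated objective: alternative
-- what changed: Replaces the two sequential index-based while loops (climb then descend) by a data-driven formulation: build the list of pairwise comparison signs of adjacent characters once, then decide by membership tests and comparison with its descending sort.
import Mathlib
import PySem

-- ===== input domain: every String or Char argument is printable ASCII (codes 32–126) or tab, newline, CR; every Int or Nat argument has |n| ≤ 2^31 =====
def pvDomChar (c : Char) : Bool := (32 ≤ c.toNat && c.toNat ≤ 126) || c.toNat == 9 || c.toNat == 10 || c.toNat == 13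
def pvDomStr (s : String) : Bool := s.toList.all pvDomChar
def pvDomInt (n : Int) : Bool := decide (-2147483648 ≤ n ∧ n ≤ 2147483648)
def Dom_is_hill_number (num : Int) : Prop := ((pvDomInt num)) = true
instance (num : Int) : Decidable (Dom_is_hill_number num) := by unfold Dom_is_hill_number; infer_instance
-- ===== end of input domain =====

-- B replaces A's two sequential index-based while loops by a sign-list formulation
-- (pairwise comparison signs, membership tests, comparison with the descending sort);
-- objective: alternative decomposition, equal on all inputs.

-- ===== PORT A =====
-- A's while loop 'while i < n and c(digits[i-1], digits[i]): i += 1'; both of A's loops are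
-- instances (c is the comparison). The guard i < n keeps both getD indices in range, so getD
-- is exact for Python's digits[i-1] / digits[i] here (i starts at 1 and only grows).
def pvScan (c : Char → Char → Bool) (d : List Char) (i : Nat) : Nat :=
  if h : i < d.length ∧ c (d.getD (i-1) ' ') (d.getD i ' ') = true then
    pvScan c d (i+1)
  else i
termination_by d.length - i
decreasing_by omega

def is_hill_number (num : Int) : Bool :=
  let digits := PySem.Int.toChars num
  let n := digits.length
  if n < 3 then false
  else
    let i := pvScan (fun a b => decide (a < b)) digits 1   -- strictly increasing
    if i = 1 ∨ i = n then false
    else decide (pvScan (fun a b => decide (b < a)) digits i = n)   -- strictly decreasing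

-- ===== PORT B =====
-- '1 if b > a else (-1 if b < a else 0)'
def pvSign (a b : Char) : Int := if a < b then 1 else if b < a then -1 else 0

-- 'zip(s, s[1:])' then the comprehension
def pvSigns (s : List Char) : List Int :=
  (s.zip (PySem.List.slice s (some 1) none)).map (fun p => pvSign p.1 p.2)

def is_hill_number_alt (num : Int) : Bool :=
  let s := PySem.Int.toChars num
  if s.length < 3 then false
  else
    let signs := pvSigns s
    !(signs.contains 0) && signs.contains 1 && signs.contains (-1) &&
      decide (signs = PySem.List.sorted signs (fun x => x) true)

-- ===== PRECONDITION & SPEC =====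
def Spec_is_hill_number (num : Int) (out : Bool) : Prop := out = is_hill_number_alt num
instance (num : Int) (out : Bool) : Decidable (Spec_is_hill_number num out) := by unfold Spec_is_hill_number; infer_instance

-- ===== CLAIM (what is proved, stated in full; the proofs are below) =====
def Claim_equal_is_hill_number : Prop := ∀ (num : Int), Dom_is_hill_number num → Spec_is_hill_number num (is_hill_number num)

-- ===== LEMMAS AND PROOFS =====

lemma pvSigns_length (s : List Char) : (pvSigns s).length = s.length - 1 := by
  simp [pvSigns, PySem.List.slice_from_one, List.length_tail]

lemma pvSigns_getD (s : List Char) (j : Nat) (hj : j + 1 < s.length) :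
    (pvSigns s).getD j 0 = pvSign (s.getD j ' ') (s.getD (j+1) ' ') := by
  have hjl : j < (pvSigns s).length := by rw [pvSigns_length]; omega
  have h1 : j < s.length := by omega
  have h2 : j < s.tail.length := by simp [List.length_tail]; omega
  rw [List.getD_eq_getElem _ _ hjl, List.getD_eq_getElem _ _ h1, List.getD_eq_getElem _ _ hj]
  simp [pvSigns, PySem.List.slice_from_one, List.getElem_zip, List.getElem_tail]

lemma pvSigns_mem (s : List Char) (x : Int) (hx : x ∈ pvSigns s) :
    x = 1 ∨ x = -1 ∨ x = 0 := by
  simp only [pvSigns, List.mem_map] at hx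
  obtain ⟨p, -, rfl⟩ := hx
  unfold pvSign
  split_ifs <;> simp

-- the scan loop counted through the sign list
lemma pvScan_eq (c : Char → Char → Bool) (p : Int → Bool) (d : List Char)
    (hc : ∀ j, j + 1 < d.length →
        c (d.getD j ' ') (d.getD (j+1) ' ') = p ((pvSigns d).getD j 0)) :
    ∀ k i, d.length - i ≤ k → 1 ≤ i → i ≤ d.length →
      pvScan c d i = i + (((pvSigns d).drop (i-1)).takeWhile p).length := by
  intro k
  induction k with
  | zero =>
    intro i hk h1 hn
    have hi : i = d.length := by omega
    rw [pvScan, dif_neg (fun h => absurd h.1 (by omega))]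
    have hdrop : ((pvSigns d).drop (i-1)) = [] := by
      apply List.drop_eq_nil_of_le; rw [pvSigns_length]; omega
    rw [hdrop]; simp
  | succ k ih =>
    intro i hk h1 hn
    rw [pvScan]
    by_cases hlt : i < d.length
    · have hj := hc (i-1) (by omega)
      rw [Nat.sub_add_cancel h1] at hj
      have hidx : i - 1 < (pvSigns d).length := by rw [pvSigns_length]; omega
      have hcons : (pvSigns d).drop (i-1) = (pvSigns d)[i-1] :: (pvSigns d).drop i := by
        have h' := List.drop_eq_getElem_cons hidx
        rwa [show i - 1 + 1 = i from by omega] at h'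
      have hgetD : (pvSigns d).getD (i-1) 0 = (pvSigns d)[i-1] :=
        List.getD_eq_getElem _ _ hidx
      by_cases hcond : c (d.getD (i-1) ' ') (d.getD i ' ') = true
      · rw [dif_pos ⟨hlt, hcond⟩]
        have hp : p ((pvSigns d)[i-1]) = true := by rw [← hgetD, ← hj]; exact hcond
        rw [ih (i+1) (by omega) (by omega) (by omega)]
        rw [hcons, List.takeWhile_cons_of_pos hp]
        simp only [Nat.add_sub_cancel, List.length_cons]
        omega
      · rw [dif_neg (by tauto)]
        have hp : p ((pvSigns d)[i-1]) = false := by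
          rw [← hgetD, ← hj]; exact Bool.eq_false_iff.mpr hcond
        rw [hcons, List.takeWhile_cons_of_neg (by simp [hp])]
        simp
    · rw [dif_neg (by tauto)]
      have hdrop : ((pvSigns d).drop (i-1)) = [] := by
        apply List.drop_eq_nil_of_le; rw [pvSigns_length]; omega
      simp [hdrop]

lemma up_cond (a b : Char) : decide (a < b) = ((pvSign a b) == 1) := by
  unfold pvSign
  rcases lt_trichotomy a b with h | h | h <;> simp [h, not_lt_of_gt]

lemma down_cond (a b : Char) : decide (b < a) = ((pvSign a b) == (-1 : Int)) := by
  unfold pvSign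
  rcases lt_trichotomy a b with h | h | h <;> simp [h, not_lt_of_gt]

-- the combinatorial heart: A's loop-derived condition vs B's sign-list condition,
-- for any list over {1,-1,0}
lemma hill_iff (l : List Int) (hdom : ∀ x ∈ l, x = 1 ∨ x = -1 ∨ x = 0) :
    (0 < (l.takeWhile (· == (1:Int))).length ∧
     (l.takeWhile (· == (1:Int))).length < l.length ∧
     ∀ x ∈ l.drop (l.takeWhile (· == (1:Int))).length, x = -1) ↔
    ((0:Int) ∉ l ∧ (1:Int) ∈ l ∧ (-1:Int) ∈ l ∧ l.Pairwise (fun a b => b ≤ a)) := by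
  set p : Int → Bool := (· == (1:Int)) with hp
  have hsplit : l.takeWhile p ++ l.dropWhile p = l := List.takeWhile_append_dropWhile
  have hdropeq : l.drop (l.takeWhile p).length = l.dropWhile p := by
    have h := List.drop_left (l₁ := l.takeWhile p) (l₂ := l.dropWhile p)
    rwa [hsplit] at h
  have hlensum : (l.takeWhile p).length + (l.dropWhile p).length = l.length := by
    have := congrArg List.length hsplit
    rwa [List.length_append] at this
  have htw1 : ∀ x ∈ l.takeWhile p, x = 1 := by
    intro x hx
    have := List.mem_takeWhile_imp hx
    simpa [hp] using this
  constructor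
  · rintro ⟨hu0, hum, hall⟩
    rw [hdropeq] at hall
    have htwne : l.takeWhile p ≠ [] := by
      intro h; rw [h] at hu0; simp at hu0
    have hdwne : l.dropWhile p ≠ [] := by
      intro h
      rw [h] at hlensum
      simp at hlensum
      omega
    have hmem : ∀ x ∈ l, x = 1 ∨ x = -1 := by
      intro x hx
      rw [← hsplit] at hx
      rcases List.mem_append.mp hx with h | h
      · exact Or.inl (htw1 x h)
      · exact Or.inr (hall x h)
    refine ⟨?_, ?_, ?_, ?_⟩
    · intro h0; rcases hmem 0 h0 with h | h <;> norm_num at h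
    · have hh := List.head_mem htwne
      have he := htw1 _ hh
      exact List.Sublist.mem (he ▸ hh) (List.takeWhile_sublist p)
    · have hh := List.head_mem hdwne
      have he := hall _ hh
      exact List.Sublist.mem (he ▸ hh) (List.dropWhile_sublist p)
    · rw [← hsplit]
      rw [List.pairwise_append]
      refine ⟨?_, ?_, ?_⟩
      · exact List.pairwise_of_forall_mem_list (fun a ha b hb => by
          rw [htw1 a ha, htw1 b hb])
      · exact List.pairwise_of_forall_mem_list (fun a ha b hb => by
          rw [hall a ha, hall b hb])
      · intro a ha b hb
        rw [htw1 a ha, hall b hb]; norm_num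
  · rintro ⟨h0, h1, hm1, hpw⟩
    have hmem : ∀ x ∈ l, x = 1 ∨ x = -1 := by
      intro x hx
      rcases hdom x hx with h | h | h
      · exact Or.inl h
      · exact Or.inr h
      · exact absurd (h ▸ hx) h0
    have hdwne : l.dropWhile p ≠ [] := by
      intro h
      have hl : l = l.takeWhile p := by
        calc l = l.takeWhile p ++ l.dropWhile p := hsplit.symm
        _ = l.takeWhile p := by rw [h, List.append_nil]
      have := htw1 _ (hl ▸ hm1)
      norm_num at this
    have hall : ∀ x ∈ l.dropWhile p, x = -1 := by
      obtain ⟨y, t, hyt⟩ := List.exists_cons_of_ne_nil hdwne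
      have hyf : p y = false := by
        have := List.head_dropWhile_not p (l := l) hdwne
        simp only [hyt] at this
        simpa using this
      have hymem : y ∈ l :=
        List.Sublist.mem (by rw [hyt]; exact List.mem_cons_self) (List.dropWhile_sublist p)
      have hy : y = -1 := by
        rcases hmem y hymem with h | h
        · rw [h, hp] at hyf; norm_num at hyf
        · exact h
      have hdwpw : (l.dropWhile p).Pairwise (fun a b => b ≤ a) :=
        hpw.sublist (List.dropWhile_sublist p)
      rw [hyt] at hdwpw
      intro x hx
      rw [hyt] at hx
      rcases List.mem_cons.mp hx with h | h
      · rw [h, hy]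
      · have hle : x ≤ y := (List.pairwise_cons.mp hdwpw).1 x h
        have hxmem : x ∈ l :=
          List.Sublist.mem (by rw [hyt]; exact List.mem_cons_of_mem _ h)
            (List.dropWhile_sublist p)
        rcases hmem x hxmem with hh | hh
        · rw [hh, hy] at hle; norm_num at hle
        · exact hh
    refine ⟨?_, ?_, ?_⟩
    · obtain ⟨y, t, hyt⟩ := List.exists_cons_of_ne_nil (List.ne_nil_of_mem h1)
      have hy1 : y = 1 := by
        rcases hmem y (by rw [hyt]; exact List.mem_cons_self) with h | h
        · exact h
        · exfalso
          rw [hyt] at h1 hpw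
          rcases List.mem_cons.mp h1 with hh | hh
          · rw [h] at hh; norm_num at hh
          · have := (List.pairwise_cons.mp hpw).1 1 hh
            rw [h] at this; norm_num at this
      have : l.takeWhile p = y :: (t.takeWhile p) := by
        rw [hyt, List.takeWhile_cons_of_pos (by rw [hp, hy1]; simp)]
      rw [this]; exact Nat.succ_pos _
    · have : (l.dropWhile p).length ≠ 0 := by
        intro h
        exact hdwne (List.length_eq_zero_iff.mp h)
      omega
    · rw [hdropeq]; exact hall

-- assemble: for any char list of length ≥ 3 the two bodies agree
lemma main_eq (d : List Char) (h3 : 3 ≤ d.length) :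
    (if pvScan (fun a b => decide (a < b)) d 1 = 1 ∨
        pvScan (fun a b => decide (a < b)) d 1 = d.length then false
     else decide (pvScan (fun a b => decide (b < a)) d
            (pvScan (fun a b => decide (a < b)) d 1) = d.length)) =
    (!((pvSigns d).contains 0) && (pvSigns d).contains 1 && (pvSigns d).contains (-1) &&
      decide (pvSigns d = PySem.List.sorted (pvSigns d) (fun x => x) true)) := by
  set sg := pvSigns d with hsg
  have hm : sg.length = d.length - 1 := pvSigns_length d
  set u := (sg.takeWhile (· == (1:Int))).length with hu
  have hule : u ≤ sg.length := by
    simpa [hu] using List.Sublist.length_le (List.takeWhile_sublist _)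
  have hscanUp : pvScan (fun a b => decide (a < b)) d 1 = 1 + u := by
    have := pvScan_eq (fun a b => decide (a < b)) (· == (1:Int)) d
      (fun j hj => by
        show decide (d.getD j ' ' < d.getD (j+1) ' ') = ((pvSigns d).getD j 0 == 1)
        rw [up_cond, pvSigns_getD d j hj])
      d.length 1 (by omega) (by omega) (by omega)
    simpa using this
  rw [hscanUp]
  by_cases hcase : 1 + u = 1 ∨ 1 + u = d.length
  · rw [if_pos hcase]
    -- A is false: show B is false via hill_iff
    have hnot : ¬ ((0:Int) ∉ sg ∧ (1:Int) ∈ sg ∧ (-1:Int) ∈ sg ∧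
        sg.Pairwise (fun a b => b ≤ a)) := by
      intro hB
      have := (hill_iff sg (fun x hx => pvSigns_mem d x (hsg ▸ hx))).mpr hB
      rw [← hu, hm] at this
      omega
    symm
    rw [Bool.eq_false_iff]
    intro hB
    simp only [Bool.and_eq_true, Bool.not_eq_true', decide_eq_true_eq,
      List.contains_eq_mem, decide_eq_false_iff_not] at hB
    obtain ⟨⟨⟨hb0, hb1⟩, hbm1⟩, hbs⟩ := hB
    apply hnot
    refine ⟨hb0, hb1, hbm1, ?_⟩
    rw [hbs]
    exact PySem.List.sorted_pairwise_rev sg (fun x => x)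
  · rw [if_neg hcase]
    rw [not_or] at hcase
    have hu0 : 0 < u := by omega
    have hub : 1 + u ≤ d.length := by omega
    have hscanDown : pvScan (fun a b => decide (b < a)) d (1 + u) =
        1 + u + ((sg.drop u).takeWhile (· == (-1:Int))).length := by
      have := pvScan_eq (fun a b => decide (b < a)) (· == (-1:Int)) d
        (fun j hj => by
          show decide (d.getD (j+1) ' ' < d.getD j ' ') = ((pvSigns d).getD j 0 == (-1:Int))
          rw [down_cond, pvSigns_getD d j hj])
        d.length (1 + u) (by omega) (by omega) hub
      simpa using this
    rw [hscanDown]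
    have htle : ((sg.drop u).takeWhile (· == (-1:Int))).length ≤ (sg.drop u).length :=
      List.Sublist.length_le (List.takeWhile_sublist _)
    have hdl : (sg.drop u).length = sg.length - u := List.length_drop ..
    -- the numeric condition ↔ all of drop u is -1
    have hnum : (1 + u + ((sg.drop u).takeWhile (· == (-1:Int))).length = d.length) ↔
        (∀ x ∈ sg.drop u, x = -1) := by
      constructor
      · intro h
        have hlen : ((sg.drop u).takeWhile (· == (-1:Int))).length = (sg.drop u).length := by
          omega
        have heq : (sg.drop u).takeWhile (· == (-1:Int)) = sg.drop u :=
          List.Sublist.eq_of_length (List.takeWhile_sublist _) hlen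
        intro x hx
        have := List.mem_takeWhile_imp (heq ▸ hx)
        simpa using this
      · intro h
        have : (sg.drop u).takeWhile (· == (-1:Int)) = sg.drop u :=
          List.takeWhile_eq_self_iff.mpr (fun x hx => by simp [h x hx])
        rw [this]
        omega
    have hiff := hill_iff sg (fun x hx => pvSigns_mem d x (hsg ▸ hx))
    rw [← hu] at hiff
    have hA : (0 < u ∧ u < sg.length ∧ ∀ x ∈ sg.drop u, x = -1) ↔
        (∀ x ∈ sg.drop u, x = -1) := by
      constructor
      · tauto
      · intro h
        refine ⟨hu0, by omega, h⟩
    -- both sides are decide of equivalent props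
    have hBiff : ((0:Int) ∉ sg ∧ (1:Int) ∈ sg ∧ (-1:Int) ∈ sg ∧
        sg.Pairwise (fun a b => b ≤ a)) ↔
        ((0:Int) ∉ sg ∧ (1:Int) ∈ sg ∧ (-1:Int) ∈ sg ∧
         sg = PySem.List.sorted sg (fun x => x) true) := by
      constructor
      · rintro ⟨a, b, c, hpw⟩
        exact ⟨a, b, c, (PySem.List.sorted_rev_eq_self_of_pairwise sg (fun x => x) hpw).symm⟩
      · rintro ⟨a, b, c, hs⟩
        refine ⟨a, b, c, ?_⟩
        rw [hs]
        exact PySem.List.sorted_pairwise_rev sg (fun x => x)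
    rw [show (decide (1 + u + ((sg.drop u).takeWhile (· == (-1:Int))).length = d.length)) =
        decide ((0:Int) ∉ sg ∧ (1:Int) ∈ sg ∧ (-1:Int) ∈ sg ∧
          sg = PySem.List.sorted sg (fun x => x) true) from by
      apply Bool.decide_congr
      rw [hnum, ← hA, hiff, hBiff]]
    simp [List.contains_eq_mem, Bool.decide_and, Bool.and_assoc]

-- ===== VERDICT (by name: the statement is the Claim_ definition above) =====
theorem is_hill_number_spec : Claim_equal_is_hill_number := by
  unfold Claim_equal_is_hill_number
  intro num _
  unfold Spec_is_hill_number is_hill_number is_hill_number_alt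
  by_cases h3 : (PySem.Int.toChars num).length < 3
  · simp [h3]
  · rw [Nat.not_lt] at h3
    simp only [if_neg (by omega : ¬ (PySem.Int.toChars num).length < 3)]
    exact main_eq (PySem.Int.toChars num) h3
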